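-- pv_equiv track=rewrite | github.com/fahricigdem/python-my.codewars-solutions | 7 kyu Reflecting Light.py | reflections
-- ===== SOURCE A (Python) =====
-- def reflections(max_x, max_y):
--     x=y=0
--     Light=state1=True
--     state2=state3=state4=False
--     END=None
--     while Light:
--         if state1:
--             x+=1
--             y+=1
--             if x == max_x and y == max_y: return True
--             elif x==max_x: state1,state2=False,True
--             elif y==max_y: state1,state4=False,True
--         if state2:
--             x-=1
--             y+=1
--             if x == 0 and y == max_y: return False
--             elif x==0: state2,state1=False,True
--             elif y==max_y:state2,state3=False,True
--         if state3:
--             x-=1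
--             y-=1
--             if x == 0 and y == 0:return True
--             elif x==0: state3,state4=False,True
--             elif y==0: state3,state2=False,True
--         if state4:
--             x+=1
--             y-=1
--             if x == max_x and y == 0: return False
--             elif x==max_x:state4,state3=False,True
--             elif y==0: state4,state1=False,True
-- ===== SOURCE B (Python) =====
-- def reflections(max_x, max_y):
--     # gcd reduction: the ray ends at the corner determined by the parities of
--     # max_x/g and max_y/g; returns True exactly when both are odd.
--     a, b = max_x, max_y
--     while b:
--         a, b = b, a % b
--     g = a
--     return (max_x // g) % 2 == 1 and (max_y // g) % 2 == 1
-- ===== Notes on version B (the rewrite author's own statement) =====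
-- stated objective: faster
-- what changed: replaced the step-by-step bounce simulation (lcm(max_x,max_y) iterations) by a Euclidean-gcd parity formula: the ray ends in a returning corner iff max_x/g and max_y/g are both odd
import Mathlib
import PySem

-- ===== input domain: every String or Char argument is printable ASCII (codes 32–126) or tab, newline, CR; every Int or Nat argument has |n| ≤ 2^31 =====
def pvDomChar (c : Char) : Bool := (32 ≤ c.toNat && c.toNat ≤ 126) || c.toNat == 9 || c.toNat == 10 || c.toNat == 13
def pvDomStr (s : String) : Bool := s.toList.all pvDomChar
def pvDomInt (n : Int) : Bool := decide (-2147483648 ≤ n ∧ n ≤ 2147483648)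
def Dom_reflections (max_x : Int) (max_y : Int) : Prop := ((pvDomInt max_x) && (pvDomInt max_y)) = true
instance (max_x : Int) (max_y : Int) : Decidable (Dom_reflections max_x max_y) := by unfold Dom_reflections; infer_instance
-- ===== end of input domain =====

-- B replaces A's step-by-step bounce simulation by a Euclidean-gcd parity formula (objective: faster).

-- ===== PORT A =====
-- A is a `while True` loop over state (x, y, state1..state4); each of the four
-- `if stateK:` blocks is transliterated as a helper returning either the early
-- return value (.inl) or the updated state (.inr); the while loop is a fuel
-- recursion (fuel |max_x*max_y|+1 exceeds the iteration count wherever A returns).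
def pvBlk1 (mx my : Int) (st : Int × Int × Bool × Bool × Bool × Bool) :
    Sum Bool (Int × Int × Bool × Bool × Bool × Bool) :=
  match st with
  | (x, y, s1, s2, s3, s4) =>
    if s1 then
      let x := x + 1
      let y := y + 1
      if x = mx ∧ y = my then .inl true
      else if x = mx then .inr (x, y, false, true, s3, s4)
      else if y = my then .inr (x, y, false, s2, s3, true)
      else .inr (x, y, s1, s2, s3, s4)
    else .inr (x, y, s1, s2, s3, s4)

def pvBlk2 (mx my : Int) (st : Int × Int × Bool × Bool × Bool × Bool) :
    Sum Bool (Int × Int × Bool × Bool × Bool × Bool) :=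
  match st with
  | (x, y, s1, s2, s3, s4) =>
    if s2 then
      let x := x - 1
      let y := y + 1
      if x = 0 ∧ y = my then .inl false
      else if x = 0 then .inr (x, y, true, false, s3, s4)
      else if y = my then .inr (x, y, s1, false, true, s4)
      else .inr (x, y, s1, s2, s3, s4)
    else .inr (x, y, s1, s2, s3, s4)

def pvBlk3 (mx my : Int) (st : Int × Int × Bool × Bool × Bool × Bool) :
    Sum Bool (Int × Int × Bool × Bool × Bool × Bool) :=
  match st with
  | (x, y, s1, s2, s3, s4) =>
    if s3 then
      let x := x - 1
      let y := y - 1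
      if x = 0 ∧ y = 0 then .inl true
      else if x = 0 then .inr (x, y, s1, s2, false, true)
      else if y = 0 then .inr (x, y, s1, true, false, s4)
      else .inr (x, y, s1, s2, s3, s4)
    else .inr (x, y, s1, s2, s3, s4)

def pvBlk4 (mx my : Int) (st : Int × Int × Bool × Bool × Bool × Bool) :
    Sum Bool (Int × Int × Bool × Bool × Bool × Bool) :=
  match st with
  | (x, y, s1, s2, s3, s4) =>
    if s4 then
      let x := x + 1
      let y := y - 1
      if x = mx ∧ y = 0 then .inl false
      else if x = mx then .inr (x, y, s1, s2, true, false)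
      else if y = 0 then .inr (x, y, true, s2, s3, false)
      else .inr (x, y, s1, s2, s3, s4)
    else .inr (x, y, s1, s2, s3, s4)

def pvLoop (mx my : Int) : Nat → (Int × Int × Bool × Bool × Bool × Bool) → Bool
  | 0, _ => false
  | f+1, st =>
    match pvBlk1 mx my st with
    | .inl b => b
    | .inr st =>
      match pvBlk2 mx my st with
      | .inl b => b
      | .inr st =>
        match pvBlk3 mx my st with
        | .inl b => b
        | .inr st =>
          match pvBlk4 mx my st with
          | .inl b => b
          | .inr st => pvLoop mx my f st

def reflections (max_x : Int) (max_y : Int) : Bool :=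
  pvLoop max_x max_y ((max_x * max_y).natAbs + 1) (0, 0, true, false, false, false)

-- ===== PORT B =====
-- helper lemma needed by pvGcdLoop's termination (cited in decreasing_by)
theorem pvModAbsLt (a b : Int) (hb : ¬ b = 0) : (PySem.Int.mod a b).natAbs < b.natAbs := by
  rcases lt_or_gt_of_ne hb with h | h
  · have h1 := PySem.Int.mod_neg_bounds (a := a) (b := b) h
    omega
  · have h1 := PySem.Int.mod_nonneg (a := a) (b := b) h
    have h2 := PySem.Int.mod_lt (a := a) (b := b) h
    omega

def pvGcdLoop (a b : Int) : Int :=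
  if h : b = 0 then a else pvGcdLoop b (PySem.Int.mod a b)
termination_by b.natAbs
decreasing_by exact pvModAbsLt a b h

def reflections_alt (max_x : Int) (max_y : Int) : Bool :=
  let g := pvGcdLoop max_x max_y
  decide (PySem.Int.mod (PySem.Int.floordiv max_x g) 2 = 1) &&
    decide (PySem.Int.mod (PySem.Int.floordiv max_y g) 2 = 1)

-- ===== PRECONDITION & SPEC =====
-- A's while loop never returns (diverges) unless both arguments are positive.
def Pre_reflections (max_x : Int) (max_y : Int) : Prop := 1 ≤ max_x ∧ 1 ≤ max_y
instance (max_x : Int) (max_y : Int) : Decidable (Pre_reflections max_x max_y) := by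
  unfold Pre_reflections; infer_instance
def pvWitness_reflections : Int × Int := (6, 4)

def Spec_reflections (max_x : Int) (max_y : Int) (out : Bool) : Prop := out = reflections_alt max_x max_y
instance (max_x : Int) (max_y : Int) (out : Bool) : Decidable (Spec_reflections max_x max_y out) := by unfold Spec_reflections; infer_instance

-- ===== CLAIM (what is proved, stated in full; the proofs are below) =====
def Claim_equal_reflections : Prop := ∀ (max_x : Int) (max_y : Int), Dom_reflections max_x max_y → Pre_reflections max_x max_y → Spec_reflections max_x max_y (reflections max_x max_y)

-- ===== LEMMAS AND PROOFS =====

-- the folded position and direction of one axis after t unit diagonal moves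
def pvPos (m t : Nat) : Nat := if t % (2*m) ≤ m then t % (2*m) else 2*m - t % (2*m)
def pvDir (m t : Nat) : Bool := decide (t % (2*m) < m)

-- A's loop state after t moves (x, y, state1, state2, state3, state4)
def pvState (m n t : Nat) : Int × Int × Bool × Bool × Bool × Bool :=
  ((pvPos m t : Int), (pvPos n t : Int),
    pvDir m t && pvDir n t, !pvDir m t && pvDir n t,
    !pvDir m t && !pvDir n t, pvDir m t && !pvDir n t)

theorem pvModStep (m t : Nat) (hm : 1 ≤ m) :
    (t+1) % (2*m) = if t % (2*m) + 1 = 2*m then 0 else t % (2*m) + 1 := by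
  have h2 : 1 % (2*m) = 1 := Nat.mod_eq_of_lt (by omega)
  have h3 : t % (2*m) < 2*m := Nat.mod_lt _ (by omega)
  rw [Nat.add_mod, h2]
  split_ifs with h
  · rw [h, Nat.mod_self]
  · exact Nat.mod_eq_of_lt (by omega)

theorem pvDvdIff (m u : Nat) (hm : 1 ≤ m) :
    m ∣ u ↔ (u % (2*m) = 0 ∨ u % (2*m) = m) := by
  constructor
  · rintro ⟨k, rfl⟩
    have h1 : m * k % (2 * m) = m * (k % 2) := by
      rw [show 2 * m = m * 2 by ring, Nat.mul_mod_mul_left]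
    have h2 : k % 2 = 0 ∨ k % 2 = 1 := by omega
    rcases h2 with h2 | h2 <;> rw [h1, h2] <;> omega
  · intro h
    rcases h with h | h
    · exact dvd_trans (dvd_mul_left m 2) (Nat.dvd_of_mod_eq_zero h)
    · have hd := Nat.div_add_mod u (2*m)
      refine ⟨2 * (u / (2*m)) + 1, ?_⟩
      calc u = 2*m*(u/(2*m)) + u % (2*m) := by omega
        _ = m * (2*(u/(2*m)) + 1) := by rw [h]; ring

theorem pvAxisTrue (m t : Nat) (hm : 1 ≤ m) (h : pvDir m t = true) :
    pvPos m (t+1) = pvPos m t + 1 ∧ pvPos m (t+1) ≠ 0 ∧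
    (pvPos m (t+1) = m ↔ m ∣ (t+1)) ∧
    (m ∣ (t+1) → pvDir m (t+1) = false) ∧ (¬ m ∣ (t+1) → pvDir m (t+1) = true) := by
  have hlt : t % (2*m) < m := by simpa [pvDir] using h
  have hmod : t % (2*m) < 2*m := Nat.mod_lt _ (by omega)
  have h1 : (t+1) % (2*m) = t % (2*m) + 1 := by
    rw [pvModStep m t hm, if_neg (by omega)]
  have hdvd := pvDvdIff m (t+1) hm
  rw [h1] at hdvd
  refine ⟨?_, ?_, ?_, ?_, ?_⟩
  · simp only [pvPos]; rw [h1]; clear hdvd h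
    split_ifs <;> (try simp only [Nat.add_one_ne_zero, false_or]) <;> omega
  · simp only [pvPos]; rw [h1]; clear hdvd h
    split_ifs <;> (try simp only [Nat.add_one_ne_zero, false_or]) <;> omega
  · rw [hdvd]; simp only [pvPos]; rw [h1]; clear hdvd h h1
    split_ifs <;> (try simp only [Nat.add_one_ne_zero, false_or]) <;> omega
  · intro hdv; have h2 := hdvd.mp hdv
    simp only [pvDir]; rw [h1]; clear hdvd h hdv
    exact decide_eq_false (by omega)
  · intro hdv; rw [hdvd] at hdv
    simp only [pvDir]; rw [h1]; clear h
    exact decide_eq_true (by omega)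

theorem pvAxisFalse (m t : Nat) (hm : 1 ≤ m) (h : pvDir m t = false) :
    pvPos m t = pvPos m (t+1) + 1 ∧ pvPos m (t+1) ≠ m ∧
    (pvPos m (t+1) = 0 ↔ m ∣ (t+1)) ∧
    (m ∣ (t+1) → pvDir m (t+1) = true) ∧ (¬ m ∣ (t+1) → pvDir m (t+1) = false) := by
  have hlt : ¬ t % (2*m) < m := by simpa [pvDir] using h
  have hmod : t % (2*m) < 2*m := Nat.mod_lt _ (by omega)
  have hdvd := pvDvdIff m (t+1) hm
  by_cases hend : t % (2*m) + 1 = 2*m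
  · have h1 : (t+1) % (2*m) = 0 := by rw [pvModStep m t hm, if_pos hend]
    rw [h1] at hdvd
    have hdv : m ∣ (t+1) := hdvd.mpr (Or.inl rfl)
    refine ⟨?_, ?_, ?_, ?_, ?_⟩
    · simp only [pvPos]; rw [h1]; clear hdvd h; split_ifs <;> omega
    · simp only [pvPos]; rw [h1]; clear hdvd h; split_ifs <;> omega
    · simp only [pvPos]; rw [h1]; simp [hdv, Nat.zero_le]
    · intro _; simp only [pvDir]; rw [h1]; exact decide_eq_true (by omega)
    · intro hc; exact absurd hdv hc
  · have h1 : (t+1) % (2*m) = t % (2*m) + 1 := by rw [pvModStep m t hm, if_neg hend]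
    rw [h1] at hdvd
    have hnd : ¬ m ∣ (t+1) := by rw [hdvd]; push_neg; omega
    refine ⟨?_, ?_, ?_, ?_, ?_⟩
    · simp only [pvPos]; rw [h1]; clear hdvd h hnd; split_ifs <;> omega
    · simp only [pvPos]; rw [h1]; clear hdvd h hnd; split_ifs <;> omega
    · simp only [pvPos]; rw [h1]
      constructor
      · intro h0; exfalso; clear hdvd h hnd; split_ifs at h0 <;> omega
      · intro hdv; exact absurd hdv hnd
    · intro hdv; exact absurd hdv hnd
    · intro _; simp only [pvDir]; rw [h1]; clear hdvd h hnd
      exact decide_eq_false (by omega)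

theorem pvCorner (m n t : Nat) (ht : t + 1 ≤ Nat.lcm m n) :
    (m ∣ (t+1) ∧ n ∣ (t+1)) ↔ t + 1 = Nat.lcm m n := by
  constructor
  · rintro ⟨h1, h2⟩
    have := Nat.le_of_dvd (by omega) (Nat.lcm_dvd h1 h2)
    omega
  · rintro hL
    rw [hL]
    exact ⟨Nat.dvd_lcm_left m n, Nat.dvd_lcm_right m n⟩

theorem pvBlk1_step (m n t : Nat) (hm : 1 ≤ m) (hn : 1 ≤ n)
    (ht : t + 1 ≤ Nat.lcm m n) (h1 : pvDir m t = true) (h2 : pvDir n t = true) :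
    pvBlk1 (m:Int) (n:Int) (pvState m n t) =
      if t + 1 = Nat.lcm m n then .inl true else .inr (pvState m n (t+1)) := by
  obtain ⟨hax1, hax2, hax3, hax4, hax5⟩ := pvAxisTrue m t hm h1
  obtain ⟨hay1, hay2, hay3, hay4, hay5⟩ := pvAxisTrue n t hn h2
  have hx : (pvPos m t : Int) + 1 = (pvPos m (t+1) : Int) := by rw [hax1]; push_cast; ring
  have hy : (pvPos n t : Int) + 1 = (pvPos n (t+1) : Int) := by rw [hay1]; push_cast; ring
  by_cases hdm : m ∣ (t+1) <;> by_cases hdn : n ∣ (t+1)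
  · have hL : t + 1 = Nat.lcm m n := (pvCorner m n t ht).mp ⟨hdm, hdn⟩
    have hcm : pvPos m (t+1) = m := hax3.mpr hdm
    have hcn : pvPos n (t+1) = n := hay3.mpr hdn
    rw [hL] at hcm hcn
    simp [pvBlk1, pvState, h1, h2, hx, hy, hcm, hcn, hL]
  · have hL : ¬ t + 1 = Nat.lcm m n := fun hL => hdn ((pvCorner m n t ht).mpr hL).2
    have hcm : pvPos m (t+1) = m := hax3.mpr hdm
    have hcn : ¬ pvPos n (t+1) = n := fun hc => hdn (hay3.mp hc)
    have hdm' : pvDir m (t+1) = false := hax4 hdm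
    have hdn' : pvDir n (t+1) = true := hay5 hdn
    simp [pvBlk1, pvState, h1, h2, hx, hy, hcm, hcn, hL, hdm', hdn']
  · have hL : ¬ t + 1 = Nat.lcm m n := fun hL => hdm ((pvCorner m n t ht).mpr hL).1
    have hcm : ¬ pvPos m (t+1) = m := fun hc => hdm (hax3.mp hc)
    have hcn : pvPos n (t+1) = n := hay3.mpr hdn
    have hdm' : pvDir m (t+1) = true := hax5 hdm
    have hdn' : pvDir n (t+1) = false := hay4 hdn
    simp [pvBlk1, pvState, h1, h2, hx, hy, hcm, hcn, hL, hdm', hdn']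
  · have hL : ¬ t + 1 = Nat.lcm m n := fun hL => hdm ((pvCorner m n t ht).mpr hL).1
    have hcm : ¬ pvPos m (t+1) = m := fun hc => hdm (hax3.mp hc)
    have hcn : ¬ pvPos n (t+1) = n := fun hc => hdn (hay3.mp hc)
    have hdm' : pvDir m (t+1) = true := hax5 hdm
    have hdn' : pvDir n (t+1) = true := hay5 hdn
    simp [pvBlk1, pvState, h1, h2, hx, hy, hcm, hcn, hL, hdm', hdn']

theorem pvBlk2_step (m n t : Nat) (hm : 1 ≤ m) (hn : 1 ≤ n)
    (ht : t + 1 ≤ Nat.lcm m n) (h1 : pvDir m t = false) (h2 : pvDir n t = true) :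
    pvBlk2 (m:Int) (n:Int) (pvState m n t) =
      if t + 1 = Nat.lcm m n then .inl false else .inr (pvState m n (t+1)) := by
  obtain ⟨hax1, hax2, hax3, hax4, hax5⟩ := pvAxisFalse m t hm h1
  obtain ⟨hay1, hay2, hay3, hay4, hay5⟩ := pvAxisTrue n t hn h2
  have hx : (pvPos m t : Int) - 1 = (pvPos m (t+1) : Int) := by rw [hax1]; push_cast; ring
  have hy : (pvPos n t : Int) + 1 = (pvPos n (t+1) : Int) := by rw [hay1]; push_cast; ring
  by_cases hdm : m ∣ (t+1) <;> by_cases hdn : n ∣ (t+1)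
  · have hL : t + 1 = Nat.lcm m n := (pvCorner m n t ht).mp ⟨hdm, hdn⟩
    have hcm : pvPos m (t+1) = 0 := hax3.mpr hdm
    have hcn : pvPos n (t+1) = n := hay3.mpr hdn
    rw [hL] at hcm hcn
    simp [pvBlk2, pvState, h1, h2, hx, hy, hcm, hcn, hL]
  · have hL : ¬ t + 1 = Nat.lcm m n := fun hL => hdn ((pvCorner m n t ht).mpr hL).2
    have hcm : pvPos m (t+1) = 0 := hax3.mpr hdm
    have hcn : ¬ pvPos n (t+1) = n := fun hc => hdn (hay3.mp hc)
    have hdm' : pvDir m (t+1) = true := hax4 hdm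
    have hdn' : pvDir n (t+1) = true := hay5 hdn
    simp [pvBlk2, pvState, h1, h2, hx, hy, hcm, hcn, hL, hdm', hdn']
  · have hL : ¬ t + 1 = Nat.lcm m n := fun hL => hdm ((pvCorner m n t ht).mpr hL).1
    have hcm : ¬ pvPos m (t+1) = 0 := fun hc => hdm (hax3.mp hc)
    have hcn : pvPos n (t+1) = n := hay3.mpr hdn
    have hdm' : pvDir m (t+1) = false := hax5 hdm
    have hdn' : pvDir n (t+1) = false := hay4 hdn
    simp [pvBlk2, pvState, h1, h2, hx, hy, hcm, hcn, hL, hdm', hdn']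
  · have hL : ¬ t + 1 = Nat.lcm m n := fun hL => hdm ((pvCorner m n t ht).mpr hL).1
    have hcm : ¬ pvPos m (t+1) = 0 := fun hc => hdm (hax3.mp hc)
    have hcn : ¬ pvPos n (t+1) = n := fun hc => hdn (hay3.mp hc)
    have hdm' : pvDir m (t+1) = false := hax5 hdm
    have hdn' : pvDir n (t+1) = true := hay5 hdn
    simp [pvBlk2, pvState, h1, h2, hx, hy, hcm, hcn, hL, hdm', hdn']

theorem pvBlk3_step (m n t : Nat) (hm : 1 ≤ m) (hn : 1 ≤ n)
    (ht : t + 1 ≤ Nat.lcm m n) (h1 : pvDir m t = false) (h2 : pvDir n t = false) :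
    pvBlk3 (m:Int) (n:Int) (pvState m n t) =
      if t + 1 = Nat.lcm m n then .inl true else .inr (pvState m n (t+1)) := by
  obtain ⟨hax1, hax2, hax3, hax4, hax5⟩ := pvAxisFalse m t hm h1
  obtain ⟨hay1, hay2, hay3, hay4, hay5⟩ := pvAxisFalse n t hn h2
  have hx : (pvPos m t : Int) - 1 = (pvPos m (t+1) : Int) := by rw [hax1]; push_cast; ring
  have hy : (pvPos n t : Int) - 1 = (pvPos n (t+1) : Int) := by rw [hay1]; push_cast; ring
  by_cases hdm : m ∣ (t+1) <;> by_cases hdn : n ∣ (t+1)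
  · have hL : t + 1 = Nat.lcm m n := (pvCorner m n t ht).mp ⟨hdm, hdn⟩
    have hcm : pvPos m (t+1) = 0 := hax3.mpr hdm
    have hcn : pvPos n (t+1) = 0 := hay3.mpr hdn
    rw [hL] at hcm hcn
    simp [pvBlk3, pvState, h1, h2, hx, hy, hcm, hcn, hL]
  · have hL : ¬ t + 1 = Nat.lcm m n := fun hL => hdn ((pvCorner m n t ht).mpr hL).2
    have hcm : pvPos m (t+1) = 0 := hax3.mpr hdm
    have hcn : ¬ pvPos n (t+1) = 0 := fun hc => hdn (hay3.mp hc)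
    have hdm' : pvDir m (t+1) = true := hax4 hdm
    have hdn' : pvDir n (t+1) = false := hay5 hdn
    simp [pvBlk3, pvState, h1, h2, hx, hy, hcm, hcn, hL, hdm', hdn']
  · have hL : ¬ t + 1 = Nat.lcm m n := fun hL => hdm ((pvCorner m n t ht).mpr hL).1
    have hcm : ¬ pvPos m (t+1) = 0 := fun hc => hdm (hax3.mp hc)
    have hcn : pvPos n (t+1) = 0 := hay3.mpr hdn
    have hdm' : pvDir m (t+1) = false := hax5 hdm
    have hdn' : pvDir n (t+1) = true := hay4 hdn
    simp [pvBlk3, pvState, h1, h2, hx, hy, hcm, hcn, hL, hdm', hdn']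
  · have hL : ¬ t + 1 = Nat.lcm m n := fun hL => hdm ((pvCorner m n t ht).mpr hL).1
    have hcm : ¬ pvPos m (t+1) = 0 := fun hc => hdm (hax3.mp hc)
    have hcn : ¬ pvPos n (t+1) = 0 := fun hc => hdn (hay3.mp hc)
    have hdm' : pvDir m (t+1) = false := hax5 hdm
    have hdn' : pvDir n (t+1) = false := hay5 hdn
    simp [pvBlk3, pvState, h1, h2, hx, hy, hcm, hcn, hL, hdm', hdn']

theorem pvBlk4_step (m n t : Nat) (hm : 1 ≤ m) (hn : 1 ≤ n)
    (ht : t + 1 ≤ Nat.lcm m n) (h1 : pvDir m t = true) (h2 : pvDir n t = false) :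
    pvBlk4 (m:Int) (n:Int) (pvState m n t) =
      if t + 1 = Nat.lcm m n then .inl false else .inr (pvState m n (t+1)) := by
  obtain ⟨hax1, hax2, hax3, hax4, hax5⟩ := pvAxisTrue m t hm h1
  obtain ⟨hay1, hay2, hay3, hay4, hay5⟩ := pvAxisFalse n t hn h2
  have hx : (pvPos m t : Int) + 1 = (pvPos m (t+1) : Int) := by rw [hax1]; push_cast; ring
  have hy : (pvPos n t : Int) - 1 = (pvPos n (t+1) : Int) := by rw [hay1]; push_cast; ring
  by_cases hdm : m ∣ (t+1) <;> by_cases hdn : n ∣ (t+1)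
  · have hL : t + 1 = Nat.lcm m n := (pvCorner m n t ht).mp ⟨hdm, hdn⟩
    have hcm : pvPos m (t+1) = m := hax3.mpr hdm
    have hcn : pvPos n (t+1) = 0 := hay3.mpr hdn
    rw [hL] at hcm hcn
    simp [pvBlk4, pvState, h1, h2, hx, hy, hcm, hcn, hL]
  · have hL : ¬ t + 1 = Nat.lcm m n := fun hL => hdn ((pvCorner m n t ht).mpr hL).2
    have hcm : pvPos m (t+1) = m := hax3.mpr hdm
    have hcn : ¬ pvPos n (t+1) = 0 := fun hc => hdn (hay3.mp hc)
    have hdm' : pvDir m (t+1) = false := hax4 hdm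
    have hdn' : pvDir n (t+1) = false := hay5 hdn
    simp [pvBlk4, pvState, h1, h2, hx, hy, hcm, hcn, hL, hdm', hdn']
  · have hL : ¬ t + 1 = Nat.lcm m n := fun hL => hdm ((pvCorner m n t ht).mpr hL).1
    have hcm : ¬ pvPos m (t+1) = m := fun hc => hdm (hax3.mp hc)
    have hcn : pvPos n (t+1) = 0 := hay3.mpr hdn
    have hdm' : pvDir m (t+1) = true := hax5 hdm
    have hdn' : pvDir n (t+1) = true := hay4 hdn
    simp [pvBlk4, pvState, h1, h2, hx, hy, hcm, hcn, hL, hdm', hdn']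
  · have hL : ¬ t + 1 = Nat.lcm m n := fun hL => hdm ((pvCorner m n t ht).mpr hL).1
    have hcm : ¬ pvPos m (t+1) = m := fun hc => hdm (hax3.mp hc)
    have hcn : ¬ pvPos n (t+1) = 0 := fun hc => hdn (hay3.mp hc)
    have hdm' : pvDir m (t+1) = true := hax5 hdm
    have hdn' : pvDir n (t+1) = false := hay5 hdn
    simp [pvBlk4, pvState, h1, h2, hx, hy, hcm, hcn, hL, hdm', hdn']

theorem pvBlk1_skip (mx my : Int) (x y : Int) (s2 s3 s4 : Bool) :
    pvBlk1 mx my (x, y, false, s2, s3, s4) = .inr (x, y, false, s2, s3, s4) := rfl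

theorem pvBlk2_skip (mx my : Int) (x y : Int) (s1 s3 s4 : Bool) :
    pvBlk2 mx my (x, y, s1, false, s3, s4) = .inr (x, y, s1, false, s3, s4) := rfl

theorem pvBlk3_skip (mx my : Int) (x y : Int) (s1 s2 s4 : Bool) :
    pvBlk3 mx my (x, y, s1, s2, false, s4) = .inr (x, y, s1, s2, false, s4) := rfl

theorem pvBlk4_skip (mx my : Int) (x y : Int) (s1 s2 s3 : Bool) :
    pvBlk4 mx my (x, y, s1, s2, s3, false) = .inr (x, y, s1, s2, s3, false) := rfl

-- the final answer of the simulation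
def pvAns (m n : Nat) : Bool := pvDir m (Nat.lcm m n - 1) == pvDir n (Nat.lcm m n - 1)

-- the tail of one while-iteration starting at block 4 / 3 / 2 / 1
def pvRun4 (mx my : Int) (f : Nat) (st : Int × Int × Bool × Bool × Bool × Bool) : Bool :=
  match pvBlk4 mx my st with
  | .inl b => b
  | .inr st => pvLoop mx my f st

def pvRun3 (mx my : Int) (f : Nat) (st : Int × Int × Bool × Bool × Bool × Bool) : Bool :=
  match pvBlk3 mx my st with
  | .inl b => b
  | .inr st => pvRun4 mx my f st

def pvRun2 (mx my : Int) (f : Nat) (st : Int × Int × Bool × Bool × Bool × Bool) : Bool :=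
  match pvBlk2 mx my st with
  | .inl b => b
  | .inr st => pvRun3 mx my f st

def pvRun1 (mx my : Int) (f : Nat) (st : Int × Int × Bool × Bool × Bool × Bool) : Bool :=
  match pvBlk1 mx my st with
  | .inl b => b
  | .inr st => pvRun2 mx my f st

theorem pvLoop_succ (mx my : Int) (f : Nat) (st : Int × Int × Bool × Bool × Bool × Bool) :
    pvLoop mx my (f+1) st = pvRun1 mx my f st := rfl

theorem pvFrom4 (m n f u : Nat) (hm : 1 ≤ m) (hn : 1 ≤ n)
    (hu : u < Nat.lcm m n) (hf : Nat.lcm m n ≤ u + 1 + f)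
    (h1 : pvDir m u = true) (h2 : pvDir n u = false)
    (IH : ∀ t, t < Nat.lcm m n → Nat.lcm m n ≤ t + f →
      pvLoop (m:Int) (n:Int) f (pvState m n t) = pvAns m n) :
    pvRun4 (m:Int) (n:Int) f (pvState m n u) = pvAns m n := by
  unfold pvRun4
  rw [pvBlk4_step m n u hm hn (by omega) h1 h2]
  by_cases hL : u + 1 = Nat.lcm m n
  · rw [if_pos hL]
    have hu1 : Nat.lcm m n - 1 = u := by omega
    simp [pvAns, hu1, h1, h2]
  · rw [if_neg hL]
    exact IH (u+1) (by omega) (by omega)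

theorem pvFrom3 (m n f u : Nat) (hm : 1 ≤ m) (hn : 1 ≤ n)
    (hu : u < Nat.lcm m n) (hf : Nat.lcm m n ≤ u + 1 + f)
    (h1 : pvDir m u = false) (h2 : pvDir n u = false)
    (IH : ∀ t, t < Nat.lcm m n → Nat.lcm m n ≤ t + f →
      pvLoop (m:Int) (n:Int) f (pvState m n t) = pvAns m n) :
    pvRun3 (m:Int) (n:Int) f (pvState m n u) = pvAns m n := by
  obtain ⟨_, _, _, hax4, hax5⟩ := pvAxisFalse m u hm h1
  obtain ⟨_, _, _, hay4, hay5⟩ := pvAxisFalse n u hn h2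
  unfold pvRun3
  rw [pvBlk3_step m n u hm hn (by omega) h1 h2]
  by_cases hL : u + 1 = Nat.lcm m n
  · rw [if_pos hL]
    have hu1 : Nat.lcm m n - 1 = u := by omega
    simp [pvAns, hu1, h1, h2]
  · rw [if_neg hL]
    cases hd1 : pvDir m (u+1) <;> cases hd2 : pvDir n (u+1)
    · -- still state3: block 4 skipped
      show pvRun4 (m:Int) (n:Int) f (pvState m n (u+1)) = pvAns m n
      unfold pvRun4
      rw [show pvState m n (u+1) = ((pvPos m (u+1) : Int), (pvPos n (u+1) : Int),
            pvDir m (u+1) && pvDir n (u+1), !pvDir m (u+1) && pvDir n (u+1),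
            !pvDir m (u+1) && !pvDir n (u+1), pvDir m (u+1) && !pvDir n (u+1)) from rfl,
          hd1, hd2]
      rw [show ((!false && !false) : Bool) = true from rfl]
      rw [show ((false && !false) : Bool) = false from rfl, pvBlk4_skip]
      have hst : ((pvPos m (u+1) : Int), (pvPos n (u+1) : Int), (false && false : Bool),
          (!false && false : Bool), (true : Bool), (false : Bool)) = pvState m n (u+1) := by
        simp [pvState, hd1, hd2]
      rw [hst]
      exact IH (u+1) (by omega) (by omega)
    · -- became state2: block 4 skipped
      show pvRun4 (m:Int) (n:Int) f (pvState m n (u+1)) = pvAns m n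
      unfold pvRun4
      have hflag : (pvDir m (u+1) && !pvDir n (u+1)) = false := by rw [hd1]; rfl
      rw [show pvState m n (u+1) = ((pvPos m (u+1) : Int), (pvPos n (u+1) : Int),
            pvDir m (u+1) && pvDir n (u+1), !pvDir m (u+1) && pvDir n (u+1),
            !pvDir m (u+1) && !pvDir n (u+1), pvDir m (u+1) && !pvDir n (u+1)) from rfl,
          hd1, hd2]
      rw [show ((false && !true) : Bool) = false from rfl, pvBlk4_skip]
      have hst : ((pvPos m (u+1) : Int), (pvPos n (u+1) : Int), (false && true : Bool),
          (!false && true : Bool), (!false && !true : Bool), (false : Bool)) = pvState m n (u+1) := by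
        simp [pvState, hd1, hd2]
      rw [hst]
      exact IH (u+1) (by omega) (by omega)
    · -- became state4
      exact pvFrom4 m n f (u+1) hm hn (by omega) (by omega) hd1 hd2 IH
    · -- both directions flipped: impossible unless at the corner
      exfalso
      have hdm : m ∣ (u+1) := by
        by_contra hc; rw [hax5 hc] at hd1; cases hd1
      have hdn : n ∣ (u+1) := by
        by_contra hc; rw [hay5 hc] at hd2; cases hd2
      exact hL ((pvCorner m n u (by omega)).mp ⟨hdm, hdn⟩)

theorem pvState_expand (m n u : Nat) :
    pvState m n u = ((pvPos m u : Int), (pvPos n u : Int),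
      pvDir m u && pvDir n u, !pvDir m u && pvDir n u,
      !pvDir m u && !pvDir n u, pvDir m u && !pvDir n u) := rfl

theorem pvFrom2 (m n f u : Nat) (hm : 1 ≤ m) (hn : 1 ≤ n)
    (hu : u < Nat.lcm m n) (hf : Nat.lcm m n ≤ u + 1 + f)
    (h1 : pvDir m u = false) (h2 : pvDir n u = true)
    (IH : ∀ t, t < Nat.lcm m n → Nat.lcm m n ≤ t + f →
      pvLoop (m:Int) (n:Int) f (pvState m n t) = pvAns m n) :
    pvRun2 (m:Int) (n:Int) f (pvState m n u) = pvAns m n := by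
  obtain ⟨_, _, _, hax4, hax5⟩ := pvAxisFalse m u hm h1
  obtain ⟨_, _, _, hay4, hay5⟩ := pvAxisTrue n u hn h2
  unfold pvRun2
  rw [pvBlk2_step m n u hm hn (by omega) h1 h2]
  by_cases hL : u + 1 = Nat.lcm m n
  · rw [if_pos hL]
    have hu1 : Nat.lcm m n - 1 = u := by omega
    simp [pvAns, hu1, h1, h2]
  · rw [if_neg hL]
    show pvRun3 (m:Int) (n:Int) f (pvState m n (u+1)) = pvAns m n
    cases hd1 : pvDir m (u+1) <;> cases hd2 : pvDir n (u+1)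
    · exact pvFrom3 m n f (u+1) hm hn (by omega) (by omega) hd1 hd2 IH
    · -- still state2: blocks 3 and 4 skipped
      unfold pvRun3
      rw [pvState_expand m n (u+1), hd1, hd2]
      simp only [Bool.not_false, Bool.not_true, Bool.false_and, Bool.true_and,
        Bool.and_false, Bool.and_true]
      rw [pvBlk3_skip]
      show pvRun4 (m:Int) (n:Int) f
        ((pvPos m (u+1) : Int), (pvPos n (u+1) : Int), false, true, false, false) = pvAns m n
      unfold pvRun4
      rw [pvBlk4_skip]
      show pvLoop (m:Int) (n:Int) f
        ((pvPos m (u+1) : Int), (pvPos n (u+1) : Int), false, true, false, false) = pvAns m n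
      have hst : ((pvPos m (u+1) : Int), (pvPos n (u+1) : Int),
          (false:Bool), (true:Bool), (false:Bool), (false:Bool)) = pvState m n (u+1) := by
        simp [pvState, hd1, hd2]
      rw [hst]
      exact IH (u+1) (by omega) (by omega)
    · exfalso
      have hdm : m ∣ (u+1) := by by_contra hc; rw [hax5 hc] at hd1; cases hd1
      have hdn : n ∣ (u+1) := by by_contra hc; rw [hay5 hc] at hd2; cases hd2
      exact hL ((pvCorner m n u (by omega)).mp ⟨hdm, hdn⟩)
    · -- became state1: blocks 3 and 4 skipped
      unfold pvRun3
      rw [pvState_expand m n (u+1), hd1, hd2]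
      simp only [Bool.not_false, Bool.not_true, Bool.false_and, Bool.true_and,
        Bool.and_false, Bool.and_true]
      rw [pvBlk3_skip]
      show pvRun4 (m:Int) (n:Int) f
        ((pvPos m (u+1) : Int), (pvPos n (u+1) : Int), true, false, false, false) = pvAns m n
      unfold pvRun4
      rw [pvBlk4_skip]
      show pvLoop (m:Int) (n:Int) f
        ((pvPos m (u+1) : Int), (pvPos n (u+1) : Int), true, false, false, false) = pvAns m n
      have hst : ((pvPos m (u+1) : Int), (pvPos n (u+1) : Int),
          (true:Bool), (false:Bool), (false:Bool), (false:Bool)) = pvState m n (u+1) := by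
        simp [pvState, hd1, hd2]
      rw [hst]
      exact IH (u+1) (by omega) (by omega)

theorem pvFrom1 (m n f u : Nat) (hm : 1 ≤ m) (hn : 1 ≤ n)
    (hu : u < Nat.lcm m n) (hf : Nat.lcm m n ≤ u + 1 + f)
    (h1 : pvDir m u = true) (h2 : pvDir n u = true)
    (IH : ∀ t, t < Nat.lcm m n → Nat.lcm m n ≤ t + f →
      pvLoop (m:Int) (n:Int) f (pvState m n t) = pvAns m n) :
    pvRun1 (m:Int) (n:Int) f (pvState m n u) = pvAns m n := by
  obtain ⟨_, _, _, hax4, hax5⟩ := pvAxisTrue m u hm h1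
  obtain ⟨_, _, _, hay4, hay5⟩ := pvAxisTrue n u hn h2
  unfold pvRun1
  rw [pvBlk1_step m n u hm hn (by omega) h1 h2]
  by_cases hL : u + 1 = Nat.lcm m n
  · rw [if_pos hL]
    have hu1 : Nat.lcm m n - 1 = u := by omega
    simp [pvAns, hu1, h1, h2]
  · rw [if_neg hL]
    show pvRun2 (m:Int) (n:Int) f (pvState m n (u+1)) = pvAns m n
    cases hd1 : pvDir m (u+1) <;> cases hd2 : pvDir n (u+1)
    · exfalso
      have hdm : m ∣ (u+1) := by by_contra hc; rw [hax5 hc] at hd1; cases hd1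
      have hdn : n ∣ (u+1) := by by_contra hc; rw [hay5 hc] at hd2; cases hd2
      exact hL ((pvCorner m n u (by omega)).mp ⟨hdm, hdn⟩)
    · exact pvFrom2 m n f (u+1) hm hn (by omega) (by omega) hd1 hd2 IH
    · -- became state4: blocks 2 and 3 skipped
      unfold pvRun2
      rw [pvState_expand m n (u+1), hd1, hd2]
      simp only [Bool.not_false, Bool.not_true, Bool.false_and, Bool.true_and,
        Bool.and_false, Bool.and_true]
      rw [pvBlk2_skip]
      show pvRun3 (m:Int) (n:Int) f
        ((pvPos m (u+1) : Int), (pvPos n (u+1) : Int), false, false, false, true) = pvAns m n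
      unfold pvRun3
      rw [pvBlk3_skip]
      show pvRun4 (m:Int) (n:Int) f
        ((pvPos m (u+1) : Int), (pvPos n (u+1) : Int), false, false, false, true) = pvAns m n
      have hst : ((pvPos m (u+1) : Int), (pvPos n (u+1) : Int),
          (false:Bool), (false:Bool), (false:Bool), (true:Bool)) = pvState m n (u+1) := by
        simp [pvState, hd1, hd2]
      rw [hst]
      exact pvFrom4 m n f (u+1) hm hn (by omega) (by omega) hd1 hd2 IH
    · -- still state1: blocks 2, 3 and 4 skipped
      unfold pvRun2
      rw [pvState_expand m n (u+1), hd1, hd2]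
      simp only [Bool.not_false, Bool.not_true, Bool.false_and, Bool.true_and,
        Bool.and_false, Bool.and_true]
      rw [pvBlk2_skip]
      show pvRun3 (m:Int) (n:Int) f
        ((pvPos m (u+1) : Int), (pvPos n (u+1) : Int), true, false, false, false) = pvAns m n
      unfold pvRun3
      rw [pvBlk3_skip]
      show pvRun4 (m:Int) (n:Int) f
        ((pvPos m (u+1) : Int), (pvPos n (u+1) : Int), true, false, false, false) = pvAns m n
      unfold pvRun4
      rw [pvBlk4_skip]
      show pvLoop (m:Int) (n:Int) f
        ((pvPos m (u+1) : Int), (pvPos n (u+1) : Int), true, false, false, false) = pvAns m n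
      have hst : ((pvPos m (u+1) : Int), (pvPos n (u+1) : Int),
          (true:Bool), (false:Bool), (false:Bool), (false:Bool)) = pvState m n (u+1) := by
        simp [pvState, hd1, hd2]
      rw [hst]
      exact IH (u+1) (by omega) (by omega)

theorem pvLoopInv (m n : Nat) (hm : 1 ≤ m) (hn : 1 ≤ n) :
    ∀ f t, t < Nat.lcm m n → Nat.lcm m n ≤ t + f →
      pvLoop (m:Int) (n:Int) f (pvState m n t) = pvAns m n := by
  intro f
  induction f with
  | zero => intro t ht hf; omega
  | succ f IH =>
    intro t ht hf
    rw [pvLoop_succ]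
    cases h1 : pvDir m t <;> cases h2 : pvDir n t
    · -- state3: blocks 1 and 2 skipped
      unfold pvRun1
      rw [pvState_expand m n t, h1, h2]
      simp only [Bool.not_false, Bool.not_true, Bool.false_and, Bool.true_and,
        Bool.and_false, Bool.and_true]
      rw [pvBlk1_skip]
      show pvRun2 (m:Int) (n:Int) f
        ((pvPos m t : Int), (pvPos n t : Int), false, false, true, false) = pvAns m n
      unfold pvRun2
      rw [pvBlk2_skip]
      show pvRun3 (m:Int) (n:Int) f
        ((pvPos m t : Int), (pvPos n t : Int), false, false, true, false) = pvAns m n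
      have hst : ((pvPos m t : Int), (pvPos n t : Int),
          (false:Bool), (false:Bool), (true:Bool), (false:Bool)) = pvState m n t := by
        simp [pvState, h1, h2]
      rw [hst]
      exact pvFrom3 m n f t hm hn ht (by omega) h1 h2 IH
    · -- state2: block 1 skipped
      unfold pvRun1
      rw [pvState_expand m n t, h1, h2]
      simp only [Bool.not_false, Bool.not_true, Bool.false_and, Bool.true_and,
        Bool.and_false, Bool.and_true]
      rw [pvBlk1_skip]
      show pvRun2 (m:Int) (n:Int) f
        ((pvPos m t : Int), (pvPos n t : Int), false, true, false, false) = pvAns m n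
      have hst : ((pvPos m t : Int), (pvPos n t : Int),
          (false:Bool), (true:Bool), (false:Bool), (false:Bool)) = pvState m n t := by
        simp [pvState, h1, h2]
      rw [hst]
      exact pvFrom2 m n f t hm hn ht (by omega) h1 h2 IH
    · -- state4: blocks 1, 2 and 3 skipped
      unfold pvRun1
      rw [pvState_expand m n t, h1, h2]
      simp only [Bool.not_false, Bool.not_true, Bool.false_and, Bool.true_and,
        Bool.and_false, Bool.and_true]
      rw [pvBlk1_skip]
      show pvRun2 (m:Int) (n:Int) f
        ((pvPos m t : Int), (pvPos n t : Int), false, false, false, true) = pvAns m n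
      unfold pvRun2
      rw [pvBlk2_skip]
      show pvRun3 (m:Int) (n:Int) f
        ((pvPos m t : Int), (pvPos n t : Int), false, false, false, true) = pvAns m n
      unfold pvRun3
      rw [pvBlk3_skip]
      show pvRun4 (m:Int) (n:Int) f
        ((pvPos m t : Int), (pvPos n t : Int), false, false, false, true) = pvAns m n
      have hst : ((pvPos m t : Int), (pvPos n t : Int),
          (false:Bool), (false:Bool), (false:Bool), (true:Bool)) = pvState m n t := by
        simp [pvState, h1, h2]
      rw [hst]
      exact pvFrom4 m n f t hm hn ht (by omega) h1 h2 IH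
    · -- state1
      exact pvFrom1 m n f t hm hn ht (by omega) h1 h2 IH

-- B's Euclid loop computes the gcd (positive arguments; stated for naturals)
theorem pvGcdLoopSpec : ∀ (b a : Nat), pvGcdLoop (a:Int) (b:Int) = ((Nat.gcd b a : Nat) : Int) := by
  intro b
  induction b using Nat.strong_induction_on with
  | _ b IH =>
    intro a
    rw [pvGcdLoop]
    by_cases hb : b = 0
    · subst hb; simp
    · have hbz : ¬ ((b:Int) = 0) := by exact_mod_cast hb
      rw [dif_neg hbz, PySem.Int.mod_natCast a b, IH (a % b) (Nat.mod_lt a (by omega))]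
      exact congrArg _ (Nat.gcd_rec b a).symm

-- direction during the final move, in terms of the parity of the step count
theorem pvDirLast (m b' : Nat) (hm : 1 ≤ m) (hb : 1 ≤ b') :
    pvDir m (m * b' - 1) = decide (b' % 2 = 1) := by
  rcases Nat.even_or_odd b' with he | ho
  · obtain ⟨c, hc⟩ := he
    obtain ⟨c', hc'⟩ : ∃ c', c = c' + 1 := ⟨c - 1, by omega⟩
    have h1 : m * b' = 2*(m*c') + 2*m := by rw [hc, hc']; ring
    have h2 : c' * (2*m) = 2*(m*c') := by ring
    have key : m * b' - 1 = (2*m - 1) + c' * (2*m) := by omega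
    have hmod : (m * b' - 1) % (2*m) = 2*m - 1 := by
      rw [key, Nat.add_mul_mod_self_right, Nat.mod_eq_of_lt (by omega)]
    have hb2 : b' % 2 = 0 := by omega
    simp only [pvDir, hmod]
    rw [show (decide (b' % 2 = 1)) = false from by simp [hb2]]
    exact decide_eq_false (by omega)
  · obtain ⟨c, hc⟩ := ho
    have h1 : m * b' = 2*(m*c) + m := by rw [hc]; ring
    have h2 : c * (2*m) = 2*(m*c) := by ring
    have key : m * b' - 1 = (m - 1) + c * (2*m) := by omega
    have hmod : (m * b' - 1) % (2*m) = m - 1 := by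
      rw [key, Nat.add_mul_mod_self_right, Nat.mod_eq_of_lt (by omega)]
    have hb2 : b' % 2 = 1 := by omega
    simp only [pvDir, hmod]
    rw [show (decide (b' % 2 = 1)) = true from by simp [hb2]]
    exact decide_eq_true (by omega)

theorem pvLcmLeft (m n : Nat) : Nat.lcm m n = m * (n / Nat.gcd m n) := by
  rw [Nat.lcm, Nat.mul_div_assoc m (Nat.gcd_dvd_right m n)]

theorem pvLcmRight (m n : Nat) : Nat.lcm m n = n * (m / Nat.gcd m n) := by
  rw [Nat.lcm_comm, Nat.lcm, Nat.mul_div_assoc n (Nat.gcd_dvd_right n m), Nat.gcd_comm n m]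

theorem pvMainNat (m n : Nat) (hm : 1 ≤ m) (hn : 1 ≤ n) :
    reflections (m:Int) (n:Int) = reflections_alt (m:Int) (n:Int) := by
  set g := Nat.gcd m n with hgdef
  have hgpos : 0 < g := Nat.gcd_pos_of_pos_left n (by omega)
  have hgm : g ∣ m := Nat.gcd_dvd_left m n
  have hgn : g ∣ n := Nat.gcd_dvd_right m n
  have ha1 : 1 ≤ m / g := Nat.div_pos (Nat.le_of_dvd (by omega) hgm) hgpos
  have hb1 : 1 ≤ n / g := Nat.div_pos (Nat.le_of_dvd (by omega) hgn) hgpos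
  have hL0 : 0 < Nat.lcm m n := by
    rw [pvLcmLeft m n, ← hgdef]
    exact Nat.mul_pos (by omega) hb1
  have hLle : Nat.lcm m n ≤ m * n :=
    Nat.le_of_dvd (Nat.mul_pos (by omega) (by omega)) (Nat.lcm_dvd (dvd_mul_right m n) (dvd_mul_left n m))
  -- A's side: the simulation returns pvAns
  have hA : reflections (m:Int) (n:Int) = pvAns m n := by
    unfold reflections
    rw [← Nat.cast_mul, Int.natAbs_natCast]
    have hstart : ((0:Int), (0:Int), true, false, false, false) = pvState m n 0 := by
      have hp : pvPos m 0 = 0 := by simp [pvPos]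
      have hq : pvPos n 0 = 0 := by simp [pvPos]
      have hd1 : pvDir m 0 = true := decide_eq_true (by simp; omega)
      have hd2 : pvDir n 0 = true := decide_eq_true (by simp; omega)
      rw [pvState_expand, hp, hq, hd1, hd2]
      rfl
    rw [hstart]
    exact pvLoopInv m n hm hn (m*n+1) 0 hL0 (by omega)
  -- B's side: the gcd-parity formula
  have hB : reflections_alt (m:Int) (n:Int) =
      (decide ((m/g) % 2 = 1) && decide ((n/g) % 2 = 1)) := by
    unfold reflections_alt
    rw [pvGcdLoopSpec n m, Nat.gcd_comm n m, ← hgdef]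
    show (decide (PySem.Int.mod (PySem.Int.floordiv ((m:Nat):Int) ((g:Nat):Int)) 2 = 1) &&
        decide (PySem.Int.mod (PySem.Int.floordiv ((n:Nat):Int) ((g:Nat):Int)) 2 = 1)) =
      (decide ((m/g) % 2 = 1) && decide ((n/g) % 2 = 1))
    rw [PySem.Int.floordiv_natCast m g, PySem.Int.floordiv_natCast n g]
    have hmod1 : PySem.Int.mod ((m/g : Nat) : Int) 2 = (((m/g) % 2 : Nat) : Int) := by
      exact_mod_cast PySem.Int.mod_natCast (m/g) 2
    have hmod2 : PySem.Int.mod ((n/g : Nat) : Int) 2 = (((n/g) % 2 : Nat) : Int) := by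
      exact_mod_cast PySem.Int.mod_natCast (n/g) 2
    rw [hmod1, hmod2]
    simp only [Nat.cast_eq_one]
  rw [hA, hB]
  -- evaluate pvAns via the parity of lcm/m and lcm/n
  have hansm : pvDir m (Nat.lcm m n - 1) = decide ((n/g) % 2 = 1) := by
    rw [show Nat.lcm m n = m * (n/g) from by rw [pvLcmLeft m n, ← hgdef]]
    exact pvDirLast m (n/g) hm hb1
  have hansn : pvDir n (Nat.lcm m n - 1) = decide ((m/g) % 2 = 1) := by
    rw [show Nat.lcm m n = n * (m/g) from by rw [pvLcmRight m n, ← hgdef]]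
    exact pvDirLast n (m/g) hn ha1
  unfold pvAns
  rw [hansm, hansn]
  -- m/g and n/g are coprime, so they cannot both be even
  have hcop : Nat.gcd (m/g) (n/g) = 1 := Nat.coprime_div_gcd_div_gcd hgpos
  by_cases p1 : (m/g) % 2 = 1 <;> by_cases p2 : (n/g) % 2 = 1
  · simp [p1, p2]
  · simp [p1, p2]
  · simp [p1, p2]
  · exfalso
    have d1 : 2 ∣ (m/g) := Nat.dvd_of_mod_eq_zero (by omega)
    have d2 : 2 ∣ (n/g) := Nat.dvd_of_mod_eq_zero (by omega)
    have : (2:Nat) ∣ Nat.gcd (m/g) (n/g) := Nat.dvd_gcd d1 d2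
    rw [hcop] at this
    omega

-- ===== VERDICT (by name: the statement is the Claim_ definition above) =====
theorem reflections_spec : Claim_equal_reflections := by
  unfold Claim_equal_reflections Spec_reflections Pre_reflections
  intro mx my _ hpre
  obtain ⟨hx, hy⟩ := hpre
  obtain ⟨m, rfl⟩ : ∃ m : Nat, mx = (m:Int) := ⟨mx.toNat, (Int.toNat_of_nonneg (by omega)).symm⟩
  obtain ⟨n, rfl⟩ : ∃ n : Nat, my = (n:Int) := ⟨my.toNat, (Int.toNat_of_nonneg (by omega)).symm⟩
  exact pvMainNat m n (by exact_mod_cast hx) (by exact_mod_cast hy)
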